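-- pv_equiv track=rewrite | github.com/gustafbstrom/advent_of_code_2021 | day3.py | day3A
-- ===== SOURCE A (Python) =====
-- def day3A(input):
-- 	wl = len(input[0:input.index('\n')])
-- 	res = [0 for _ in range(len(input[0:wl]))]
-- 	for line in input.splitlines():
-- 		for i, bit in enumerate(line):
-- 			res[i] = res[i]+1 if bit == '1' else res[i]-1
-- 	res = ''.join(['1' if a > 0 else '0' for a in res])
-- 	return int(res, 2) * (int(res, 2)^2**wl-1)
-- ===== SOURCE B (Python) =====
-- def day3A(input):
--     nl = input.index('\n')
--     lines = input.splitlines()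
--     g = ''
--     for j in range(nl):
--         c1 = sum(1 for line in lines if j < len(line) and line[j] == '1')
--         c0 = sum(1 for line in lines if j < len(line) and line[j] != '1')
--         g += '1' if c1 > c0 else '0'
--     gamma = int(g, 2)
--     return gamma * (gamma ^ (2 ** nl - 1))
-- ===== Notes on version B (the rewrite author's own statement) =====
-- stated objective: alternative
-- what changed: B builds gamma column-major: for each of the wl bit positions it counts '1's vs other chars across the split lines directly, instead of A's row-major cell-by-cell update of a running +1/-1 accumulator array.
-- outside the precondition, e.g. on day3A('\n'): A raises ValueError, B raises ValueError; on day3A(''): A raises ValueError, B raises ValueError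
import Mathlib
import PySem

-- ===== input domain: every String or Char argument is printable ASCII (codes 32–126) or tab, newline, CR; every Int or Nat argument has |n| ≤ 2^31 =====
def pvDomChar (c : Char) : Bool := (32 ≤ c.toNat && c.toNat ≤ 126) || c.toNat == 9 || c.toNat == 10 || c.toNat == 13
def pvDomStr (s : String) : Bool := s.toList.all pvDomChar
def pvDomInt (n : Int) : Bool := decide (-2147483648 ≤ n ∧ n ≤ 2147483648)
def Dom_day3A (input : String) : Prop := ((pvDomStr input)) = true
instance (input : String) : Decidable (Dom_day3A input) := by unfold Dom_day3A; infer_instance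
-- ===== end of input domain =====

-- B replaces A's row-major ±1 accumulator array with column-major counting of '1's per bit
-- position (objective: alternative decomposition, same asymptotic cost).

-- shared helper: hand port of Python's int(s, 2); exact for nonempty strings of '0'/'1'
-- (both programs only apply it to such strings on inputs admitted by Pre_).
def pvIntOfBin (g : List Char) : Int :=
  g.foldl (fun a c => 2 * a + (if c = '1' then 1 else 0)) 0

-- ===== PORT A =====
-- inner-loop body: res[i] = res[i]+1 if bit == '1' else res[i]-1
-- (pyGetD/set with a Nat index: exact whenever the index is in range, which Pre_ guarantees;
--  Python raises IndexError out of range and Pre_ excludes exactly those inputs)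
def pvStepA (r : List Int) (p : Int × Char) : List Int :=
  r.set p.1.toNat (if p.2 = '1' then PySem.List.pyGetD r p.1 0 + 1 else PySem.List.pyGetD r p.1 0 - 1)

-- input.index('\n') ported as Chars.find (for a single-char needle substring search is
-- first-occurrence search; Python raises ValueError when absent — excluded by Pre_)
def day3A (input : String) : Int :=
  let cs := input.toList
  let wl := (PySem.Chars.slice cs (some 0) (some (PySem.Chars.find cs ['\n']))).length
  let res0 : List Int := (List.range (PySem.Chars.slice cs (some 0) (some (wl : Int))).length).map (fun _ => (0 : Int))
  let res := (PySem.Chars.splitlines cs).foldl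
      (fun r line => (PySem.List.enumerate line).foldl pvStepA r) res0
  let g : List Char := res.map (fun a => if a > 0 then '1' else '0')
  let gi := pvIntOfBin g
  gi * PySem.Int.bxor gi (2 ^ wl - 1)

-- ===== PORT B =====
-- sum(1 for line in lines if j < len(line) and line[j] == cond): the guard j < len(line)
-- short-circuits, so pyGetD's default ' ' is never the decisive value
def pvCount1 (lines : List (List Char)) (j : Int) : Int :=
  lines.foldl (fun a l =>
    a + (if j < (l.length : Int) ∧ PySem.List.pyGetD l j ' ' = '1' then 1 else 0)) 0

def pvCount0 (lines : List (List Char)) (j : Int) : Int :=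
  lines.foldl (fun a l =>
    a + (if j < (l.length : Int) ∧ ¬ PySem.List.pyGetD l j ' ' = '1' then 1 else 0)) 0

-- 2 ** nl ported via nl.toNat: exact since nl = input.index('\n') ≥ 0 whenever B returns
def day3A_alt (input : String) : Int :=
  let cs := input.toList
  let nl := PySem.Chars.find cs ['\n']
  let lines := PySem.Chars.splitlines cs
  let g : List Char := (PySem.List.pyRange 0 nl 1).map (fun j =>
      if pvCount1 lines j > pvCount0 lines j then '1' else '0')
  let gamma := pvIntOfBin g
  gamma * PySem.Int.bxor gamma (2 ^ nl.toNat - 1)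

-- ===== PRECONDITION & SPEC =====
-- Pre_ admits exactly the inputs where A returns: a '\n' exists, the first line is nonempty
-- (else int('', 2) raises ValueError), and no splitline is longer than the first-line width
-- (else res[i] raises IndexError).
def Pre_day3A (input : String) : Prop :=
  0 < PySem.Chars.find input.toList ['\n'] ∧
  ∀ l ∈ PySem.Chars.splitlines input.toList,
    (l.length : Int) ≤ PySem.Chars.find input.toList ['\n']
instance (input : String) : Decidable (Pre_day3A input) := by unfold Pre_day3A; infer_instance

def pvWitness_day3A : String := "10\n01\n"

def Spec_day3A (input : String) (out : Int) : Prop := out = day3A_alt input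
instance (input : String) (out : Int) : Decidable (Spec_day3A input out) := by unfold Spec_day3A; infer_instance

-- ===== CLAIM (what is proved, stated in full; the proofs are below) =====
def Claim_equal_day3A : Prop := ∀ (input : String), Dom_day3A input → Pre_day3A input → Spec_day3A input (day3A input)

-- ===== LEMMAS AND PROOFS =====

-- the net ±1 contribution of one line to column j, when the line's cells occupy columns k, k+1, …
def pvColContrib (line : List Char) (k j : Nat) : Int :=
  if k ≤ j ∧ j < k + line.length then (if line.getD (j - k) ' ' = '1' then 1 else -1) else 0

def pvScore (lines : List (List Char)) (j : Nat) : Int :=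
  (lines.map (fun l => pvColContrib l 0 j)).sum

theorem pvInner (line : List Char) : ∀ (k : Nat) (res : List Int),
    k + line.length ≤ res.length →
    ((PySem.List.enumerate line (k : Int)).foldl pvStepA res).length = res.length ∧
    ∀ j : Nat, ((PySem.List.enumerate line (k : Int)).foldl pvStepA res).getD j 0
      = res.getD j 0 + pvColContrib line k j := by
  induction line with
  | nil =>
      intro k res _
      simp [PySem.List.enumerate_nil, pvColContrib]
  | cons c rest ih =>
      intro k res h
      have hk : k < res.length := by simp at h; omega
      rw [PySem.List.enumerate_cons, List.foldl_cons]
      have hstep : pvStepA res ((k : Int), c)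
          = res.set k (res.getD k 0 + (if c = '1' then 1 else -1)) := by
        unfold pvStepA
        simp [PySem.List.pyGetD_natCast]
        split <;> ring_nf
      rw [hstep]
      have hcast : (k : Int) + 1 = ((k + 1 : Nat) : Int) := by push_cast; ring
      rw [hcast]
      obtain ⟨ihlen, ihget⟩ := ih (k + 1) (res.set k (res.getD k 0 + (if c = '1' then 1 else -1)))
        (by simp at h ⊢; omega)
      refine ⟨by simpa using ihlen, fun j => ?_⟩
      rw [ihget j]
      by_cases hj : j = k
      · subst hj
        have hset : (res.set j (res.getD j 0 + (if c = '1' then 1 else -1))).getD j 0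
            = res.getD j 0 + (if c = '1' then 1 else -1) := by
          simp [List.getD_eq_getElem?_getD, List.getElem?_set_self hk]
        rw [hset]
        have h1 : pvColContrib rest (j + 1) j = 0 := by simp [pvColContrib]
        have h2 : pvColContrib (c :: rest) j j = (if c = '1' then 1 else -1) := by
          simp [pvColContrib]
        rw [h1, h2]; ring
      · have hset : (res.set k (res.getD k 0 + (if c = '1' then 1 else -1))).getD j 0
            = res.getD j 0 := by
          simp [List.getD_eq_getElem?_getD, List.getElem?_set_ne (by omega : k ≠ j)]
        rw [hset]
        have : pvColContrib (c :: rest) k j = pvColContrib rest (k + 1) j := by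
          unfold pvColContrib
          by_cases hrange : k + 1 ≤ j ∧ j < k + 1 + rest.length
          · have hjk : j - k = (j - (k + 1)) + 1 := by omega
            simp only [List.length_cons]
            rw [if_pos (by omega), if_pos hrange, hjk, List.getD_cons_succ]
          · rw [if_neg (by simp; omega), if_neg hrange]
        rw [this]

theorem pvOuter (lines : List (List Char)) : ∀ (res : List Int),
    (∀ l ∈ lines, l.length ≤ res.length) →
    (lines.foldl (fun r line => (PySem.List.enumerate line).foldl pvStepA r) res).length = res.length ∧
    ∀ j : Nat, (lines.foldl (fun r line => (PySem.List.enumerate line).foldl pvStepA r) res).getD j 0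
      = res.getD j 0 + pvScore lines j := by
  induction lines with
  | nil => intro res _; simp [pvScore]
  | cons l ls ih =>
      intro res h
      have h0 : (0 : Int) = ((0 : Nat) : Int) := by norm_num
      have hl : (0 : Nat) + l.length ≤ res.length := by
        simpa using h l (by simp)
      rw [List.foldl_cons]
      have hinner := pvInner l 0 res hl
      rw [show PySem.List.enumerate l = PySem.List.enumerate l ((0 : Nat) : Int) by norm_num] at *
      obtain ⟨hlen, hget⟩ := hinner
      obtain ⟨ihlen, ihget⟩ := ih _ (fun x hx => by rw [hlen]; exact h x (by simp [hx]))
      refine ⟨by rw [ihlen, hlen], fun j => ?_⟩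
      rw [ihget j, hget j]
      simp only [pvScore, List.map_cons, List.sum_cons]
      ring

-- one line's contribution seen column-major: the c1 term minus the c0 term is pvColContrib
theorem pvPerLine (l : List Char) (j : Nat) :
    (if (j : Int) < (l.length : Int) ∧ PySem.List.pyGetD l (j : Int) ' ' = '1' then (1 : Int) else 0)
    - (if (j : Int) < (l.length : Int) ∧ ¬ PySem.List.pyGetD l (j : Int) ' ' = '1' then (1 : Int) else 0)
    = pvColContrib l 0 j := by
  have hcast : ((j : Int) < (l.length : Int)) ↔ j < l.length := by exact_mod_cast Iff.rfl
  rw [PySem.List.pyGetD_natCast]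
  unfold pvColContrib
  by_cases hl : j < l.length
  · simp only [hcast, hl, true_and, Nat.zero_add, zero_le, Nat.sub_zero, if_pos, and_true]
    by_cases h1 : l[j]?.getD ' ' = '1' <;> simp [h1]
  · simp [hcast, hl]

theorem pvCountSub (lines : List (List Char)) (j : Nat) :
    pvCount1 lines (j : Int) - pvCount0 lines (j : Int) = pvScore lines j := by
  unfold pvCount1 pvCount0 pvScore
  rw [PySem.List.foldl_add, PySem.List.foldl_add]
  simp only [zero_add]
  induction lines with
  | nil => simp
  | cons l ls ih =>
      simp only [List.map_cons, List.sum_cons]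
      have h := pvPerLine l j
      linarith [h, ih]

theorem pvRes0getD (w j : Nat) : ((List.range w).map (fun _ => (0 : Int))).getD j 0 = 0 := by
  rcases lt_or_ge j w with h | h <;>
    simp [List.getD_eq_getElem?_getD, h]

-- ===== VERDICT (by name: the statement is the Claim_ definition above) =====
theorem day3A_spec : Claim_equal_day3A := by
  intro input _ hpre
  obtain ⟨hpos, hbound⟩ := hpre
  unfold Spec_day3A
  simp only [day3A, day3A_alt]
  set cs := input.toList with hcs
  set f := PySem.Chars.find cs ['\n'] with hf
  set w := f.toNat with hw
  set lines := PySem.Chars.splitlines cs with hlines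
  have hfw : f = (w : Int) := by rw [hw, Int.toNat_of_nonneg (le_of_lt hpos)]
  have hfl : f ≤ (cs.length : Int) := PySem.Chars.find_le_length cs ['\n']
  have hwle : w ≤ cs.length := by omega
  have hslice : ∀ b : Int, b = (w : Int) →
      (PySem.Chars.slice cs (some 0) (some b)).length = w := by
    intro b hb; subst hb
    simp [PySem.List.slice_to_natCast, List.length_take, hwle]
  have hwl : (PySem.Chars.slice cs (some 0) (some f)).length = w := by
    rw [hfw]; exact hslice _ rfl
  rw [hwl, hslice ((w : Nat) : Int) rfl]
  have hbound' : ∀ l ∈ lines, l.length ≤ ((List.range w).map (fun _ => (0 : Int))).length := by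
    intro l hl
    have := hbound l hl
    simp only [List.length_map, List.length_range]
    omega
  obtain ⟨hlenF, hgetF⟩ := pvOuter lines ((List.range w).map (fun _ => (0 : Int))) hbound'
  set final := lines.foldl (fun r line => (PySem.List.enumerate line).foldl pvStepA r)
      ((List.range w).map (fun _ => (0 : Int))) with hfinal
  have hlenF' : final.length = w := by rw [hlenF]; simp
  have hFeq : final = (List.range w).map (fun j => pvScore lines j) := by
    apply List.ext_getElem
    · simp [hlenF']
    · intro i hi1 hi2
      have hiw : i < w := by rwa [hlenF'] at hi1
      rw [List.getElem_map, List.getElem_range]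
      rw [← List.getD_eq_getElem final 0 hi1, hgetF i, pvRes0getD]
      ring
  rw [hFeq, hfw, PySem.List.pyRange_zero_natCast]
  simp only [List.map_map, Function.comp_def]
  have hg : ∀ (j : Nat), (if pvScore lines j > 0 then '1' else '0')
      = (if pvCount1 lines (j : Int) > pvCount0 lines (j : Int) then '1' else '0') := by
    intro j
    have hsub := pvCountSub lines j
    have hiff : (pvScore lines j > 0) ↔ (pvCount1 lines (j : Int) > pvCount0 lines (j : Int)) := by
      omega
    by_cases hc : pvScore lines j > 0
    · rw [if_pos hc, if_pos (hiff.mp hc)]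
    · rw [if_neg hc, if_neg (fun h => hc (hiff.mpr h))]
  simp only [hg]
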